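-- pv_equiv track=rewrite | github.com/AbdullahDaGoat/LegaciesOfMenV2 | main.py | is_valid_uk_postcode
-- ===== SOURCE A (Python) =====
-- def is_valid_uk_postcode(postcode):
--     # Remove leading and trailing whitespace
--     postcode = postcode.strip().upper()
--
--     # Define two helper functions to check if a character is a letter or a digit
--     def is_letter(char):
--         # Check if the character is between 'A' and 'Z'
--         return 'A' <= char <= 'Z'
--
--     def is_digit(char):
--         # Check if the character is between '0' and '9'
--         return '0' <= char <= '9'
--
--     # Define a function to check if a postcode matches a given format
--     def check_format(format_string, postcode):
--         # Check if the format string and the postcode have the same length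
--         if len(format_string) != len(postcode):
--             # if not true return false otherwise continue on with code (hence the !=)
--             return False
--         # Loop through the characters in the format string
--         for i in range(len(format_string)):
--             # Get the current character (i.e one of the characters) from the format string
--             f_char = format_string[i]
--             # Get the current character (i.e one of the characters) from the postcode
--             p_char = postcode[i]
--             # Check if the current character in the format string is a letter and the current character in the postcode is not a letter
--             if f_char == 'A' and not is_letter(p_char):
--                 # if not true return false otherwise continue on with code
--                 return False
--             if f_char == '9' and not is_digit(p_char):
--                 # if not true return false otherwise continue on with code
--                 return False
--             # Check if the current character in the format string is a space and the current character in the postcode is not a space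
--             if f_char == ' ' and p_char != ' ':
--                 # if not true return false otherwise continue on with code
--                 return False
--         # If we get here, it means that all the characters in the format string have been checked and they all match the corresponding characters in the postcode
--         return True
--
--     # Define a list of valid postcode formats
--     formats = [
--         "A9 9AA",
--         "A9A 9AA",
--         "A99 9AA",
--         "AA9 9AA",
--         "AA9A 9AA",
--         "AA99 9AA"
--     ]
--
--     # Loop through the formats and check if the postcode matches any of them
--     for fmt in formats:
--         # Call the check_format function to check if the postcode matches the current format
--         if check_format(fmt, postcode):
--             # if true return true otherwise continue on with code
--             return True
--
--     return False
-- ===== SOURCE B (Python) =====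
-- def is_valid_uk_postcode(postcode):
--     def classify(ch):
--         if 'A' <= ch <= 'Z':
--             return 'A'
--         if '0' <= ch <= '9':
--             return '9'
--         if ch == ' ':
--             return ' '
--         return '?'
--     shape = ''.join(classify(ch) for ch in postcode.strip().upper())
--     return shape in {"A9 9AA", "A9A 9AA", "A99 9AA", "AA9 9AA", "AA9A 9AA", "AA99 9AA"}
-- ===== Notes on version B (the rewrite author's own statement) =====
-- stated objective: simpler
-- what changed: B classifies each character of the stripped/uppercased input into a shape string ('A'/'9'/' '/'?') in one pass and tests set membership against the six fixed shapes, instead of A's loop running a positional character-by-character matcher against each of the six format strings.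
import Mathlib
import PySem

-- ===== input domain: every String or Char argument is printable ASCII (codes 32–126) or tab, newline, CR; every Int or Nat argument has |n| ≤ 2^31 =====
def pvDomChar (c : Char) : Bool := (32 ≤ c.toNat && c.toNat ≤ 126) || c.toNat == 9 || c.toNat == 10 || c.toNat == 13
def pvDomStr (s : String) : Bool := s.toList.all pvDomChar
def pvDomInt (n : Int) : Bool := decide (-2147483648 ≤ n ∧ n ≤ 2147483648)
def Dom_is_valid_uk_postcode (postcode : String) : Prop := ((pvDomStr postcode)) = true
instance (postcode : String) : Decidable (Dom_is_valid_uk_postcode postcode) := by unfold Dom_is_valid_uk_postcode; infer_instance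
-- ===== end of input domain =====

-- B replaces A's six positional format scans by a one-pass character-class "shape" string
-- compared against the fixed shape set (objective: simpler).


-- ===== PORT A =====
def pvIsLetter (c : Char) : Bool := 'A' ≤ c && c ≤ 'Z'

def pvIsDigit (c : Char) : Bool := '0' ≤ c && c ≤ '9'

-- the body of check_format's index loop, as recursion over both lists in step
def pvCheckLoop : List Char → List Char → Bool
  | [], _ => true
  | fc :: fs, pc :: ps =>
    if fc = 'A' && !pvIsLetter pc then false
    else if fc = '9' && !pvIsDigit pc then false
    else if fc = ' ' && pc ≠ ' ' then false
    else pvCheckLoop fs ps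
  | _ :: _, [] => true

def pvCheckFormat (fmt p : List Char) : Bool :=
  if fmt.length ≠ p.length then false else pvCheckLoop fmt p

def pvFormats : List (List Char) :=
  ["A9 9AA".toList, "A9A 9AA".toList, "A99 9AA".toList,
   "AA9 9AA".toList, "AA9A 9AA".toList, "AA99 9AA".toList]

-- the 'for fmt in formats: if check_format(...): return True' loop
def pvTryFormats : List (List Char) → List Char → Bool
  | [], _ => false
  | f :: rest, p => if pvCheckFormat f p then true else pvTryFormats rest p

def is_valid_uk_postcode (postcode : String) : Bool :=
  pvTryFormats pvFormats (PySem.Str.upper (PySem.Str.strip postcode)).toList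

-- ===== PORT B =====
def pvClassify (c : Char) : Char :=
  if 'A' ≤ c && c ≤ 'Z' then 'A'
  else if '0' ≤ c && c ≤ '9' then '9'
  else if c = ' ' then ' ' else '?'

def pvShapes : List (List Char) :=
  ["A9 9AA".toList, "A9A 9AA".toList, "A99 9AA".toList,
   "AA9 9AA".toList, "AA9A 9AA".toList, "AA99 9AA".toList]

def is_valid_uk_postcode_alt (postcode : String) : Bool :=
  pvShapes.contains ((PySem.Str.upper (PySem.Str.strip postcode)).toList.map pvClassify)

-- ===== PRECONDITION & SPEC =====
def Spec_is_valid_uk_postcode (postcode : String) (out : Bool) : Prop := out = is_valid_uk_postcode_alt postcode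
instance (postcode : String) (out : Bool) : Decidable (Spec_is_valid_uk_postcode postcode out) := by unfold Spec_is_valid_uk_postcode; infer_instance

-- ===== CLAIM (what is proved, stated in full; the proofs are below) =====
def Claim_equal_is_valid_uk_postcode : Prop := ∀ (postcode : String), Dom_is_valid_uk_postcode postcode → Spec_is_valid_uk_postcode postcode (is_valid_uk_postcode postcode)

-- ===== LEMMAS AND PROOFS =====

lemma pvClassify_eq_A (c : Char) : (pvClassify c == 'A') = pvIsLetter c := by
  unfold pvClassify pvIsLetter
  cases hL : ('A' ≤ c && c ≤ 'Z')
  · simp only [if_false, Bool.false_eq_true]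
    split_ifs <;> decide
  · simp [hL]

lemma pv_not_letter_and_digit (c : Char) : pvIsLetter c = true → pvIsDigit c = false := by
  intro h
  unfold pvIsLetter at h
  unfold pvIsDigit
  simp only [Bool.and_eq_true, decide_eq_true_eq] at h
  have h9 : ¬ c ≤ '9' := not_le.mpr (lt_of_lt_of_le (by decide) h.1)
  simp [h9]

lemma pvClassify_eq_9 (c : Char) : (pvClassify c == '9') = pvIsDigit c := by
  unfold pvClassify
  cases hL : ('A' ≤ c && c ≤ 'Z')
  · cases hD : ('0' ≤ c && c ≤ '9')
    · simp only [hD, if_false, Bool.false_eq_true, pvIsDigit]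
      split_ifs <;> decide
    · simp [hD, pvIsDigit]
  · have := pv_not_letter_and_digit c (by unfold pvIsLetter; rw [hL])
    simp [this]

lemma pvClassify_eq_sp (c : Char) : (pvClassify c == ' ') = (c == ' ') := by
  unfold pvClassify
  cases hL : ('A' ≤ c && c ≤ 'Z')
  · cases hD : ('0' ≤ c && c ≤ '9')
    · by_cases h : c = ' ' <;> simp [hD, h]
    · have : c ≠ ' ' := by rintro rfl; exact absurd hD (by decide)
      simp [hD, this]
  · have : c ≠ ' ' := by rintro rfl; exact absurd hL (by decide)
    simp [hL, this]

lemma pvCheckFormat_eq (fmt p : List Char)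
    (hf : ∀ c ∈ fmt, c = 'A' ∨ c = '9' ∨ c = ' ') :
    pvCheckFormat fmt p = (p.map pvClassify == fmt) := by
  unfold pvCheckFormat
  split_ifs with hl
  · have hne : List.map pvClassify p ≠ fmt := by
      intro h
      exact hl (by rw [← h]; simp)
    simp [hne]
  · push_neg at hl
    induction fmt generalizing p with
    | nil =>
      cases p with
      | nil => simp [pvCheckLoop]
      | cons a as => simp at hl
    | cons fc fs ih =>
      cases p with
      | nil => simp at hl
      | cons pc ps =>
        have hfc := hf fc (by simp)
        have hfs : ∀ c ∈ fs, c = 'A' ∨ c = '9' ∨ c = ' ' := fun c hc => hf c (by simp [hc])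
        have hl' : fs.length = ps.length := by simpa using hl
        have ihr := ih ps hfs hl'
        rcases hfc with rfl | rfl | rfl
        · simp only [pvCheckLoop, List.map_cons, List.cons_beq_cons, pvClassify_eq_A]
          cases h : pvIsLetter pc <;> simp [h, ihr]
        · simp only [pvCheckLoop, List.map_cons, List.cons_beq_cons, pvClassify_eq_9]
          cases h : pvIsDigit pc <;> simp [h, ihr]
        · simp only [pvCheckLoop, List.map_cons, List.cons_beq_cons, pvClassify_eq_sp]
          by_cases h : pc = ' ' <;> simp [h, ihr]

lemma pvToList1 : "A9 9AA".toList = ['A','9',' ','9','A','A'] := by rfl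
lemma pvToList2 : "A9A 9AA".toList = ['A','9','A',' ','9','A','A'] := by rfl
lemma pvToList3 : "A99 9AA".toList = ['A','9','9',' ','9','A','A'] := by rfl
lemma pvToList4 : "AA9 9AA".toList = ['A','A','9',' ','9','A','A'] := by rfl
lemma pvToList5 : "AA9A 9AA".toList = ['A','A','9','A',' ','9','A','A'] := by rfl
lemma pvToList6 : "AA99 9AA".toList = ['A','A','9','9',' ','9','A','A'] := by rfl

lemma pvFmtChars1 : ∀ c ∈ (['A','9',' ','9','A','A'] : List Char), c = 'A' ∨ c = '9' ∨ c = ' ' := by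
  intro c hc
  simp only [List.mem_cons, List.not_mem_nil, or_false] at hc
  rcases hc with rfl|rfl|rfl|rfl|rfl|rfl <;> simp

lemma pvFmtChars2 : ∀ c ∈ (['A','9','A',' ','9','A','A'] : List Char), c = 'A' ∨ c = '9' ∨ c = ' ' := by
  intro c hc
  simp only [List.mem_cons, List.not_mem_nil, or_false] at hc
  rcases hc with rfl|rfl|rfl|rfl|rfl|rfl|rfl <;> simp

lemma pvFmtChars3 : ∀ c ∈ (['A','9','9',' ','9','A','A'] : List Char), c = 'A' ∨ c = '9' ∨ c = ' ' := by
  intro c hc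
  simp only [List.mem_cons, List.not_mem_nil, or_false] at hc
  rcases hc with rfl|rfl|rfl|rfl|rfl|rfl|rfl <;> simp

lemma pvFmtChars4 : ∀ c ∈ (['A','A','9',' ','9','A','A'] : List Char), c = 'A' ∨ c = '9' ∨ c = ' ' := by
  intro c hc
  simp only [List.mem_cons, List.not_mem_nil, or_false] at hc
  rcases hc with rfl|rfl|rfl|rfl|rfl|rfl|rfl <;> simp

lemma pvFmtChars5 : ∀ c ∈ (['A','A','9','A',' ','9','A','A'] : List Char), c = 'A' ∨ c = '9' ∨ c = ' ' := by
  intro c hc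
  simp only [List.mem_cons, List.not_mem_nil, or_false] at hc
  rcases hc with rfl|rfl|rfl|rfl|rfl|rfl|rfl|rfl <;> simp

lemma pvFmtChars6 : ∀ c ∈ (['A','A','9','9',' ','9','A','A'] : List Char), c = 'A' ∨ c = '9' ∨ c = ' ' := by
  intro c hc
  simp only [List.mem_cons, List.not_mem_nil, or_false] at hc
  rcases hc with rfl|rfl|rfl|rfl|rfl|rfl|rfl|rfl <;> simp

lemma pvTry_eq (l : List Char) :
    pvTryFormats pvFormats l = pvShapes.contains (l.map pvClassify) := by
  simp only [pvFormats, pvShapes, pvTryFormats, List.contains_cons,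
    List.contains_nil]
  rw [pvToList1, pvToList2, pvToList3, pvToList4, pvToList5, pvToList6]
  rw [pvCheckFormat_eq _ _ pvFmtChars1, pvCheckFormat_eq _ _ pvFmtChars2,
    pvCheckFormat_eq _ _ pvFmtChars3, pvCheckFormat_eq _ _ pvFmtChars4,
    pvCheckFormat_eq _ _ pvFmtChars5, pvCheckFormat_eq _ _ pvFmtChars6]
  split_ifs with a1 a2 a3 a4 a5 a6 <;> simp_all

-- ===== VERDICT (by name: the statement is the Claim_ definition above) =====
theorem is_valid_uk_postcode_spec : Claim_equal_is_valid_uk_postcode := by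
  intro postcode _
  unfold Spec_is_valid_uk_postcode is_valid_uk_postcode is_valid_uk_postcode_alt
  exact pvTry_eq _
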